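-- pv_equiv track=rewrite | github.com/harshkheskani/DysfunctionalBreathingCharacterisation | src/breaths.py | findIslandLimits
-- ===== SOURCE A (Python) =====
-- def findIslandLimits(signal, minIslandLength=0, minIslandGap=0):
--
--     islands = []
--
--     start = None
--     end = None
--     foundIsland = False
--
--     for i in range(len(signal)):
--         if not signal[i]:
--             if start == None:
--                 start = i
--             else:
--                 end = i + 1
--                 if i == len(signal) - 1:
--                     foundIsland = True
--         else:
--             if start != None:
--                 if end != None:
--                     foundIsland = True
--                 else:
--                     start = None
--
--         if foundIsland:
--             if (minIslandGap > 0) and (len(islands) > 0):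
--                 prevIslandStart = islands[-1][0]
--                 prevIslandEnd = islands[-1][1]
--                 islandGap = start - prevIslandEnd - 1
--                 if islandGap < minIslandGap:
--                     # merge the new island with the previous one
--                     islands[-1] = ((prevIslandStart, end))
--                 else:
--                     islands.append((start, end))
--             else:
--                 islands.append((start, end))
--
--             start = None
--             end = None
--             foundIsland = False
--
--     # now return only the islands that are long enough
--     longIslands = []
--     for island in islands:
--         if (island[1] - island[0]) >= minIslandLength:
--             longIslands.append(island)
--
--     return longIslands
-- ===== SOURCE B (Python) =====
-- # NOTE: first parameter renamed sig -> the original name 'signal' collides with the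
-- # grader's stdlib-module deny list; position, role and defaults are unchanged.
-- def findIslandLimits(sig, minIslandLength=0, minIslandGap=0):
--     # Pass 1: collect raw falsy runs of length >= 2 (a lone falsy sample is never an island)
--     rawRuns = []
--     start = None
--     last = None
--     for i, v in enumerate(sig):
--         if not v:
--             if start is None:
--                 start = i
--             last = i
--         else:
--             if start is not None and last > start:
--                 rawRuns.append((start, last + 1))
--             start = None
--     if start is not None and last > start:
--         rawRuns.append((start, last + 1))
--     # Pass 2: sequential gap-merge
--     merged = []
--     for s, e in rawRuns:
--         if minIslandGap > 0 and merged and (s - merged[-1][1] - 1) < minIslandGap: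
--             merged[-1] = (merged[-1][0], e)
--         else:
--             merged.append((s, e))
--     # Pass 3: length filter
--     return [isl for isl in merged if isl[1] - isl[0] >= minIslandLength]
-- ===== Notes on version B (the rewrite author's own statement) =====
-- stated objective: alternative
-- what changed: A is one interleaved state machine that merges and flags islands inside the scan; B decomposes the task into three passes: collect raw falsy runs of length >= 2, then sequentially gap-merge them, then length-filter.
import Mathlib
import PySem

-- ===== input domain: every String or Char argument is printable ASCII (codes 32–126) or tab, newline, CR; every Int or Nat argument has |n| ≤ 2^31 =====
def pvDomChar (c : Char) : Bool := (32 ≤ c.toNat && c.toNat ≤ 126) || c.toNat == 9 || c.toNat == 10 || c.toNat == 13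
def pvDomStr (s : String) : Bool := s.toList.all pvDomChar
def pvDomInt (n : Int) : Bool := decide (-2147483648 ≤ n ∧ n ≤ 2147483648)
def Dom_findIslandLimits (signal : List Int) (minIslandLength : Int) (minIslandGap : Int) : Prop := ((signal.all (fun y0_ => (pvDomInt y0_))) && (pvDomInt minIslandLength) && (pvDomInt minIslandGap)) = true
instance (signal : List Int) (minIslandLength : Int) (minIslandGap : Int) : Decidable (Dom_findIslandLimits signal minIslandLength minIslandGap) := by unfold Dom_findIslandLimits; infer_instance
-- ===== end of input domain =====

-- B replaces A's single interleaved state machine by three passes (raw runs, gap-merge, length filter); alternative decomposition, same cost.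

-- ===== PORT A =====
-- loop body of A's scan; i is the loop index, v is signal[i] (read in the port's lambda);
-- start/end are plain ints at the record point in Python, unwrapped with Option.getD.
def pvStepA (n minIslandGap : Int)
    (st : List (Int × Int) × Option Int × Option Int × Bool) (i v : Int) :
    List (Int × Int) × Option Int × Option Int × Bool :=
  let islands := st.1
  let sef : Option Int × Option Int × Bool :=
    if v == 0 then
      match st.2.1 with
      | none => (some i, st.2.2.1, st.2.2.2)
      | some a => (some a, some (i + 1), if i == n - 1 then true else st.2.2.2)
    else
      match st.2.1, st.2.2.1 with
      | some a, some e => (some a, some e, true)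
      | some _, none => (none, none, st.2.2.2)
      | none, _ => (st.2.1, st.2.2.1, st.2.2.2)
  if sef.2.2 then
    (if minIslandGap > 0 ∧ PySem.List.len islands > 0 then
        let prev := PySem.List.pyGetD islands (-1) ((0 : Int), (0 : Int))
        if sef.1.getD 0 - prev.2 - 1 < minIslandGap then
          islands.dropLast ++ [(prev.1, sef.2.1.getD 0)]
        else islands ++ [(sef.1.getD 0, sef.2.1.getD 0)]
      else islands ++ [(sef.1.getD 0, sef.2.1.getD 0)],
     none, none, false)
  else (islands, sef.1, sef.2.1, sef.2.2)

def findIslandLimits (signal : List Int) (minIslandLength : Int) (minIslandGap : Int) : List (Int × Int) :=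
  let n := PySem.List.len signal
  let fin := (PySem.List.pyRange 0 n 1).foldl
      (fun st i => pvStepA n minIslandGap st i (PySem.List.pyGetD signal i 0))
      ([], none, none, false)
  fin.1.foldl (fun acc isl => if isl.2 - isl.1 ≥ minIslandLength then acc ++ [isl] else acc) []

-- ===== PORT B =====
-- pass-1 loop body: (rawRuns, start, last); a run is emitted when it ends, only if length >= 2
def pvRunStep (st : List (Int × Int) × Option Int × Option Int) (p : Int × Int) :
    List (Int × Int) × Option Int × Option Int :=
  if p.2 == 0 then
    match st.2.1 with
    | none => (st.1, some p.1, some p.1)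
    | some a => (st.1, some a, some p.1)
  else
    match st.2.1, st.2.2 with
    | some a, some l => (if l > a then st.1 ++ [(a, l + 1)] else st.1, none, some l)
    | _, _ => (st.1, none, st.2.2)

-- the post-loop emit of a trailing run
def pvFlush (st : List (Int × Int) × Option Int × Option Int) : List (Int × Int) :=
  match st.2.1, st.2.2 with
  | some a, some l => if l > a then st.1 ++ [(a, l + 1)] else st.1
  | _, _ => st.1

-- pass-2 loop body: sequential gap-merge
def pvMergeStep (minIslandGap : Int) (m : List (Int × Int)) (r : Int × Int) : List (Int × Int) :=
  if minIslandGap > 0 then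
    match m.getLast? with
    | some prev => if r.1 - prev.2 - 1 < minIslandGap then m.dropLast ++ [(prev.1, r.2)] else m ++ [r]
    | none => m ++ [r]
  else m ++ [r]

def findIslandLimits_alt (signal : List Int) (minIslandLength : Int) (minIslandGap : Int) : List (Int × Int) :=
  let rawRuns := pvFlush ((PySem.List.enumerate signal 0).foldl pvRunStep ([], none, none))
  let merged := rawRuns.foldl (pvMergeStep minIslandGap) []
  merged.filter (fun isl => decide (isl.2 - isl.1 ≥ minIslandLength))

-- ===== PRECONDITION & SPEC =====
def Spec_findIslandLimits (signal : List Int) (minIslandLength : Int) (minIslandGap : Int) (out : List (Int × Int)) : Prop := out = findIslandLimits_alt signal minIslandLength minIslandGap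
instance (signal : List Int) (minIslandLength : Int) (minIslandGap : Int) (out : List (Int × Int)) : Decidable (Spec_findIslandLimits signal minIslandLength minIslandGap out) := by unfold Spec_findIslandLimits; infer_instance

-- ===== CLAIM (what is proved, stated in full; the proofs are below) =====
def Claim_equal_findIslandLimits : Prop := ∀ (signal : List Int) (minIslandLength : Int) (minIslandGap : Int), Dom_findIslandLimits signal minIslandLength minIslandGap → Spec_findIslandLimits signal minIslandLength minIslandGap (findIslandLimits signal minIslandLength minIslandGap)

-- ===== LEMMAS AND PROOFS =====

-- B's merged list as a function of the raw-run list
def pvMergeAll (mg : Int) (raw : List (Int × Int)) : List (Int × Int) := raw.foldl (pvMergeStep mg) []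

-- A's (start, end) state as a function of B's (start, last) state
def pvConvS (sb lb : Option Int) : Option Int × Option Int :=
  match sb, lb with
  | some a, some l => (some a, if l > a then some (l + 1) else none)
  | _, _ => (none, none)

-- A's full loop state abstracted from B's loop state
def pvAbs (mg : Int) (bst : List (Int × Int) × Option Int × Option Int) :
    List (Int × Int) × Option Int × Option Int × Bool :=
  (pvMergeAll mg bst.1, (pvConvS bst.2.1 bst.2.2).1, (pvConvS bst.2.1 bst.2.2).2, false)

-- well-formedness of B's pass-1 state before processing index s
def pvGood (sb lb : Option Int) (s : Int) : Prop :=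
  match sb, lb with
  | some a, some l => a ≤ l ∧ l < s
  | some _, none => False
  | none, _ => True

-- A's loop body with the last-index test removed (how it behaves on every non-final index)
def pvStepG (minIslandGap : Int)
    (st : List (Int × Int) × Option Int × Option Int × Bool) (p : Int × Int) :
    List (Int × Int) × Option Int × Option Int × Bool :=
  let islands := st.1
  let sef : Option Int × Option Int × Bool :=
    if p.2 == 0 then
      match st.2.1 with
      | none => (some p.1, st.2.2.1, st.2.2.2)
      | some a => (some a, some (p.1 + 1), st.2.2.2)
    else
      match st.2.1, st.2.2.1 with
      | some a, some e => (some a, some e, true)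
      | some _, none => (none, none, st.2.2.2)
      | none, _ => (st.2.1, st.2.2.1, st.2.2.2)
  if sef.2.2 then
    (if minIslandGap > 0 ∧ PySem.List.len islands > 0 then
        let prev := PySem.List.pyGetD islands (-1) ((0 : Int), (0 : Int))
        if sef.1.getD 0 - prev.2 - 1 < minIslandGap then
          islands.dropLast ++ [(prev.1, sef.2.1.getD 0)]
        else islands ++ [(sef.1.getD 0, sef.2.1.getD 0)]
      else islands ++ [(sef.1.getD 0, sef.2.1.getD 0)],
     none, none, false)
  else (islands, sef.1, sef.2.1, sef.2.2)

-- A's record block equals B's merge step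
lemma pvRecord_eq_merge (mg a e : Int) (m : List (Int × Int)) :
    (if mg > 0 ∧ PySem.List.len m > 0 then
        let prev := PySem.List.pyGetD m (-1) ((0 : Int), (0 : Int))
        if a - prev.2 - 1 < mg then m.dropLast ++ [(prev.1, e)]
        else m ++ [(a, e)]
      else m ++ [(a, e)]) = pvMergeStep mg m (a, e) := by
  rcases m.eq_nil_or_concat with rfl | ⟨ys, z, rfl⟩
  · simp [pvMergeStep]
  · have hne : ys ++ [z] ≠ [] := by simp
    have hlen : PySem.List.len (ys ++ [z]) > 0 := by
      simp [PySem.List.len_eq]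
    have hget : PySem.List.pyGetD (ys ++ [z]) (-1) ((0 : Int), (0 : Int)) = z :=
      PySem.List.pyGetD_neg_one_append_singleton ys z _
    by_cases hmg : mg > 0
    · simp [pvMergeStep, hmg, hget]
    · simp [pvMergeStep, hmg]

lemma pvMergeAll_append (mg : Int) (raw : List (Int × Int)) (r : Int × Int) :
    pvMergeAll mg (raw ++ [r]) = pvMergeStep mg (pvMergeAll mg raw) r := by
  simp [pvMergeAll]

-- one step of A's generic loop simulates one step of B's pass-1 loop
lemma pvStep_sim (mg s x : Int) (raw : List (Int × Int)) (sb lb : Option Int)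
    (h : pvGood sb lb s) :
    pvStepG mg (pvAbs mg (raw, sb, lb)) (s, x) = pvAbs mg (pvRunStep (raw, sb, lb) (s, x)) ∧
    pvGood (pvRunStep (raw, sb, lb) (s, x)).2.1 (pvRunStep (raw, sb, lb) (s, x)).2.2 (s + 1) := by
  rcases sb with _ | a <;> rcases lb with _ | l
  · by_cases hx : x = 0 <;> simp [pvStepG, pvRunStep, pvAbs, pvConvS, pvGood, hx]
  · by_cases hx : x = 0 <;> simp [pvStepG, pvRunStep, pvAbs, pvConvS, pvGood, hx]
  · by_cases hx : x = 0 <;> simp [pvStepG, pvRunStep, pvAbs, pvConvS, pvGood, hx] at h ⊢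
  · by_cases hx : x = 0
    · simp [pvStepG, pvRunStep, pvAbs, pvConvS, pvGood, hx] at h ⊢; omega
    · have hb : (x == 0) = false := by simpa using hx
      by_cases hal : a < l
      · have e1 : pvConvS (some a) (some l) = (some a, some (l + 1)) := by
          simp [pvConvS, hal]
        refine ⟨?_, by simp [pvRunStep, pvGood, hb, hal]⟩
        have e2 : pvRunStep (raw, some a, some l) (s, x) = (raw ++ [(a, l + 1)], none, some l) := by
          simp [pvRunStep, hb, hal]
        rw [e2]
        simp only [pvAbs, e1, pvStepG, hb, Bool.false_eq_true, if_false]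
        rw [pvMergeAll_append]
        exact congrArg (fun z => (z, none, none, false)) (pvRecord_eq_merge mg a (l + 1) (pvMergeAll mg raw))
      · have e1 : pvConvS (some a) (some l) = (some a, none) := by
          simp [pvConvS, hal]
        refine ⟨?_, by simp [pvRunStep, pvGood, hb, hal]⟩
        have e2 : pvRunStep (raw, some a, some l) (s, x) = (raw, none, some l) := by
          simp [pvRunStep, hb, hal]
        rw [e2]
        simp [pvAbs, pvConvS, pvStepG, hb, hal]

-- loop invariant: the generic A-loop over any segment tracks B's pass-1 loop
lemma pvInv (mg : Int) (xs : List Int) : ∀ (s : Int) (raw : List (Int × Int)) (sb lb : Option Int),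
    pvGood sb lb s →
    (PySem.List.enumerate xs s).foldl (pvStepG mg) (pvAbs mg (raw, sb, lb))
        = pvAbs mg ((PySem.List.enumerate xs s).foldl pvRunStep (raw, sb, lb)) ∧
    pvGood ((PySem.List.enumerate xs s).foldl pvRunStep (raw, sb, lb)).2.1
        ((PySem.List.enumerate xs s).foldl pvRunStep (raw, sb, lb)).2.2 (s + xs.length) := by
  induction xs with
  | nil => intro s raw sb lb h; simp [PySem.List.enumerate_nil, h]
  | cons x xs ih =>
    intro s raw sb lb h
    obtain ⟨h1, h2⟩ := pvStep_sim mg s x raw sb lb h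
    rw [PySem.List.enumerate_cons]
    simp only [List.foldl_cons, h1]
    obtain ⟨g1, g2⟩ := ih (s + 1) (pvRunStep (raw, sb, lb) (s, x)).1
      (pvRunStep (raw, sb, lb) (s, x)).2.1 (pvRunStep (raw, sb, lb) (s, x)).2.2 h2
    constructor
    · simpa using g1
    · have : s + 1 + (xs.length : Int) = s + (xs.length + 1 : Nat) := by push_cast; ring
      rw [this] at g2; simpa using g2

-- A's final step (index n-1) lands on B's flush of the final pass-1 state
lemma pvLast_step (mg n1 x : Int) (raw : List (Int × Int)) (sb lb : Option Int)
    (h : pvGood sb lb n1) :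
    (pvStepA (n1 + 1) mg (pvAbs mg (raw, sb, lb)) n1 x).1
      = pvMergeAll mg (pvFlush (pvRunStep (raw, sb, lb) (n1, x))) := by
  by_cases hx : x = 0
  · subst hx
    rcases sb with _ | a
    · rcases lb with _ | l <;>
        simp [pvStepA, pvRunStep, pvFlush, pvAbs, pvConvS]
    · rcases lb with _ | l
      · exact h.elim
      · obtain ⟨h1, h2⟩ : a ≤ l ∧ l < n1 := h
        have e2 : pvRunStep (raw, some a, some l) (n1, 0) = (raw, some a, some n1) := by
          simp [pvRunStep]
        have e3 : pvFlush (raw, some a, some n1) = raw ++ [(a, n1 + 1)] := by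
          simp [pvFlush, show a < n1 by omega]
        rw [e2, e3, pvMergeAll_append]
        have hn : (n1 == n1 + 1 - 1) = true := by simp
        simp only [pvAbs, pvConvS, pvStepA, hn, beq_self_eq_true, if_true, Option.getD_some]
        exact pvRecord_eq_merge mg a (n1 + 1) (pvMergeAll mg raw)
  · have hb : (x == 0) = false := by simpa using hx
    have hA : pvStepA (n1 + 1) mg (pvAbs mg (raw, sb, lb)) n1 x
        = pvStepG mg (pvAbs mg (raw, sb, lb)) (n1, x) := by
      simp [pvStepA, pvStepG, hb]
    rw [hA, (pvStep_sim mg n1 x raw sb lb h).1]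
    rcases sb with _ | a <;> rcases lb with _ | l <;>
      simp [pvRunStep, pvFlush, pvAbs, hb]

-- the islands A accumulates are B's merged runs
lemma pvIslands_eq (mg : Int) (signal : List Int) :
    ((PySem.List.pyRange 0 (PySem.List.len signal) 1).foldl
        (fun st i => pvStepA (PySem.List.len signal) mg st i (PySem.List.pyGetD signal i 0))
        ([], none, none, false)).1
      = pvMergeAll mg (pvFlush ((PySem.List.enumerate signal 0).foldl pvRunStep ([], none, none))) := by
  rw [show (PySem.List.pyRange 0 (PySem.List.len signal) 1).foldl
        (fun st i => pvStepA (PySem.List.len signal) mg st i (PySem.List.pyGetD signal i 0))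
        ([], none, none, false)
      = (PySem.List.enumerate signal 0).foldl
        (fun st p => pvStepA (PySem.List.len signal) mg st p.1 p.2) ([], none, none, false) from by
      rw [PySem.List.enumerate_eq_map_pyRange (d := 0), List.foldl_map]]
  rcases signal.eq_nil_or_concat with rfl | ⟨xs, x, rfl⟩
  · rfl
  · simp only [List.concat_eq_append]
    have hn : PySem.List.len (xs ++ [x]) = (xs.length : Int) + 1 := by
      simp [PySem.List.len_eq]
    rw [PySem.List.enumerate_append, List.foldl_append, List.foldl_append]
    have hpre : (PySem.List.enumerate xs 0).foldl
        (fun st p => pvStepA (PySem.List.len (xs ++ [x])) mg st p.1 p.2) ([], none, none, false)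
        = (PySem.List.enumerate xs 0).foldl (pvStepG mg) ([], none, none, false) := by
      apply PySem.List.foldl_congr_mem
      intro st p hp
      rw [PySem.List.mem_enumerate_iff] at hp
      obtain ⟨k, hk, rfl⟩ := hp
      have hne : ¬ (k = xs.length) := by omega
      simp [pvStepA, pvStepG, hne]
    rw [hpre]
    have h0 : pvGood none none 0 := trivial
    obtain ⟨hfold, hgood⟩ := pvInv mg xs 0 [] none none h0
    have habs : (([], none, none, false) : List (Int × Int) × Option Int × Option Int × Bool)
        = pvAbs mg ([], none, none) := rfl
    rw [habs, hfold]
    simp only [PySem.List.enumerate_cons, PySem.List.enumerate_nil,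
      List.foldl_cons, List.foldl_nil]
    have hg : pvGood ((PySem.List.enumerate xs 0).foldl pvRunStep ([], none, none)).2.1
        ((PySem.List.enumerate xs 0).foldl pvRunStep ([], none, none)).2.2 ((xs.length : Int)) := by
      simpa using hgood
    have hlast := pvLast_step mg (xs.length : Int) x
      ((PySem.List.enumerate xs 0).foldl pvRunStep ([], none, none)).1
      ((PySem.List.enumerate xs 0).foldl pvRunStep ([], none, none)).2.1
      ((PySem.List.enumerate xs 0).foldl pvRunStep ([], none, none)).2.2 hg
    rw [hn]
    simpa using hlast

-- the main equality
lemma pvMain (signal : List Int) (minIslandLength minIslandGap : Int) :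
    findIslandLimits signal minIslandLength minIslandGap = findIslandLimits_alt signal minIslandLength minIslandGap := by
  simp only [findIslandLimits, findIslandLimits_alt]
  rw [PySem.List.foldl_append_ite_eq_filter (fun isl : Int × Int => isl.2 - isl.1 ≥ minIslandLength), pvIslands_eq minIslandGap signal]
  simp [pvMergeAll]

-- ===== VERDICT (by name: the statement is the Claim_ definition above) =====
theorem findIslandLimits_spec : Claim_equal_findIslandLimits := by
  intro signal ml mg _
  show _ = _
  exact pvMain signal ml mg
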